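-- pv_equiv track=rewrite | github.com/Bzzmn/cosmic-chaos-adventure | back-fastapi/app/db/repositories/personality.py | calculate_personality_stats
-- ===== SOURCE A (Python) =====
-- from typing import List, Dict, Any
--
-- def calculate_personality_stats(answers: List[int]) -> Dict[str, int]:
--     """
--     Calcula las estadísticas de personalidad a partir de las respuestas.
--
--     Args:
--         answers: Lista de índices de respuestas seleccionadas.
--
--     Returns:
--         Diccionario con las estadísticas de personalidad.
--     """
--     # Aquí se implementaría la lógica real para calcular las estadísticas
--     # basado en las respuestas y los efectos definidos en cada opción
--
--     # Por ahora, se devuelve un resultado simulado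
--     return {
--         "quantum_charisma": 50 + (sum(answers) % 50),
--         "absurdity_resistance": 30 + (sum(answers[::-1]) % 70),
--         "sarcasm_level": 40 + (sum(answers[::2]) % 60),
--         "time_warping": 20 + (sum(answers[1::2]) % 80),
--         "cosmic_luck": 60 + (sum([a * i for i, a in enumerate(answers)]) % 40),
--     }
-- ===== SOURCE B (Python) =====
-- from typing import List, Dict, Any
--
-- def calculate_personality_stats(answers: List[int]) -> Dict[str, int]:
--     total = 0
--     sum_even = 0
--     sum_odd = 0
--     weighted = 0
--     for i, a in enumerate(answers):
--         total += a
--         if i % 2 == 0: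
--             sum_even += a
--         else:
--             sum_odd += a
--         weighted += a * i
--     return {
--         "quantum_charisma": 50 + (total % 50),
--         "absurdity_resistance": 30 + (total % 70),
--         "sarcasm_level": 40 + (sum_even % 60),
--         "time_warping": 20 + (sum_odd % 80),
--         "cosmic_luck": 60 + (weighted % 40),
--     }
-- ===== Notes on version B (the rewrite author's own statement) =====
-- stated objective: simpler
-- what changed: Replaces A's five independent passes (plain sum, a reversed-slice sum, two stride-2 slice sums, and an enumerate comprehension) by one explicit loop over enumerate(answers) maintaining four accumulators, using total for both quantum_charisma and absurdity_resistance since sum(answers[::-1]) == sum(answers).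
import Mathlib
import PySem

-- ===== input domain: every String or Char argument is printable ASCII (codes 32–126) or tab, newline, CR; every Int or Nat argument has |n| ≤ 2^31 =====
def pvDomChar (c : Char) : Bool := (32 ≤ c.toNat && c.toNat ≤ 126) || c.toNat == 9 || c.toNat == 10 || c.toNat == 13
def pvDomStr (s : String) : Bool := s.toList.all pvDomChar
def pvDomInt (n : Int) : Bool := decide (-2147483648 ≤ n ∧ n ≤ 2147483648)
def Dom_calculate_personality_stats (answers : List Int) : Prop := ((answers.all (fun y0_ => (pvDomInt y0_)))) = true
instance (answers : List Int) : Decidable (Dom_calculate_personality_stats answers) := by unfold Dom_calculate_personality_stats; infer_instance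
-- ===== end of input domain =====

-- B replaces A's five separate passes (sum, reversed-slice sum, two stride-2 slice
-- sums, enumerate comprehension) by one loop over enumerate with four accumulators:
-- objective "simpler" (one pass, no intermediate lists; same O(n) cost).


-- ===== PORT A =====
-- dict literal with five distinct string keys = association list in that order.
-- slice? never returns none here (its step arguments are 2, 2 and -1, all ≠ 0),
-- so `.getD []` is exact.
def calculate_personality_stats (answers : List Int) : List (String × Int) :=
  [("quantum_charisma", 50 + PySem.Int.mod answers.sum 50),
   ("absurdity_resistance", 30 + PySem.Int.mod ((PySem.List.slice? answers none none (-1)).getD []).sum 70),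
   ("sarcasm_level", 40 + PySem.Int.mod ((PySem.List.slice? answers none none 2).getD []).sum 60),
   ("time_warping", 20 + PySem.Int.mod ((PySem.List.slice? answers (some 1) none 2).getD []).sum 80),
   ("cosmic_luck", 60 + PySem.Int.mod ((PySem.List.enumerate answers 0).map (fun p => p.2 * p.1)).sum 40)]

-- ===== PORT B =====
-- the loop body of Source B: state = (total, sum_even, sum_odd, weighted)
def pvStepB (s : Int × Int × Int × Int) (p : Int × Int) : Int × Int × Int × Int :=
  ( s.1 + p.2,
    (if PySem.Int.mod p.1 2 = 0 then s.2.1 + p.2 else s.2.1),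
    (if PySem.Int.mod p.1 2 = 0 then s.2.2.1 else s.2.2.1 + p.2),
    s.2.2.2 + p.2 * p.1 )

def calculate_personality_stats_alt (answers : List Int) : List (String × Int) :=
  let acc := (PySem.List.enumerate answers 0).foldl pvStepB (0, 0, 0, 0)
  [("quantum_charisma", 50 + PySem.Int.mod acc.1 50),
   ("absurdity_resistance", 30 + PySem.Int.mod acc.1 70),
   ("sarcasm_level", 40 + PySem.Int.mod acc.2.1 60),
   ("time_warping", 20 + PySem.Int.mod acc.2.2.1 80),
   ("cosmic_luck", 60 + PySem.Int.mod acc.2.2.2 40)]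

-- ===== PRECONDITION & SPEC =====
def Spec_calculate_personality_stats (answers : List Int) (out : List (String × Int)) : Prop := out = calculate_personality_stats_alt answers
instance (answers : List Int) (out : List (String × Int)) : Decidable (Spec_calculate_personality_stats answers out) := by unfold Spec_calculate_personality_stats; infer_instance

-- ===== CLAIM (what is proved, stated in full; the proofs are below) =====
def Claim_equal_calculate_personality_stats : Prop := ∀ (answers : List Int), Dom_calculate_personality_stats answers → Spec_calculate_personality_stats answers (calculate_personality_stats answers)

-- ===== LEMMAS AND PROOFS =====

-- sum of the even-indexed / odd-indexed elements (proof-side characterisations)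
mutual
def pvSumEv : List Int → Int
  | [] => 0
  | x :: xs => x + pvSumOd xs
def pvSumOd : List Int → Int
  | [] => 0
  | _ :: xs => pvSumEv xs
end
def pvWsum (i : Int) : List Int → Int
  | [] => 0
  | x :: xs => x * i + pvWsum (i + 1) xs

lemma pv_sl1_cons (x : Int) (xs : List Int) :
    (PySem.List.slice? (x :: xs) (some 1) none 2).getD [] =
      (PySem.List.slice? xs none none 2).getD [] := by
  simp [PySem.List.slice?, PySem.List.sliceIndices]
  apply List.filterMap_congr
  intro k _
  have h : ((1:Int) + 2 * (k:Int)).toNat = 2 * k + 1 := by omega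
  have h2 : ((2:Int) * (k:Int)).toNat = 2 * k := by omega
  rw [h, h2]
  simp

lemma pv_sl0_cons (x : Int) (xs : List Int) :
    (PySem.List.slice? (x :: xs) none none 2).getD [] =
      x :: (PySem.List.slice? xs (some 1) none 2).getD [] := by
  rcases xs with _ | ⟨y, ys⟩
  · simp [PySem.List.slice?, PySem.List.sliceIndices, List.range_succ]
  · simp [PySem.List.slice?, PySem.List.sliceIndices]
    have hL : (if (0:Int) ≤ (ys.length:Int)+1 then (((ys.length:Int)+1+1+2-1)/2).toNat else 0)
        = (ys.length+1)/2 + 1 := by split <;> omega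
    have hR : (if 0 < ys.length then (((ys.length:Int)+2-1)/2).toNat else 0)
        = (ys.length+1)/2 := by split <;> omega
    rw [hL, hR, List.range_succ_eq_map]
    simp only [List.filterMap_cons, List.filterMap_map]
    norm_num
    apply List.filterMap_congr
    intro k _
    have h1 : ((2:Int) * ((k:Int) + 1)).toNat = 2*k+2 := by omega
    have h2 : ((1:Int) + 2*(k:Int)).toNat = 2*k+1 := by omega
    rw [h1, h2]
    simp

lemma pv_sl_sums (xs : List Int) :
    ((PySem.List.slice? xs none none 2).getD []).sum = pvSumEv xs ∧
    ((PySem.List.slice? xs (some 1) none 2).getD []).sum = pvSumOd xs := by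
  induction xs with
  | nil => constructor <;> decide
  | cons x xs ih =>
    constructor
    · rw [pv_sl0_cons]
      simp [pvSumEv, ih.2]
    · rw [pv_sl1_cons]
      simp [pvSumOd, ih.1]

lemma pv_wsum_enum (xs : List Int) : ∀ (s : Int),
    ((PySem.List.enumerate xs s).map (fun p => p.2 * p.1)).sum = pvWsum s xs := by
  induction xs with
  | nil => intro s; simp [PySem.List.enumerate_nil, pvWsum]
  | cons x xs ih => intro s; simp [PySem.List.enumerate_cons, pvWsum, ih]

lemma pv_fold_char (xs : List Int) : ∀ (s : Int) (init : Int × Int × Int × Int),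
    (PySem.List.enumerate xs s).foldl pvStepB init =
      ( init.1 + xs.sum,
        init.2.1 + (if PySem.Int.mod s 2 = 0 then pvSumEv xs else pvSumOd xs),
        init.2.2.1 + (if PySem.Int.mod s 2 = 0 then pvSumOd xs else pvSumEv xs),
        init.2.2.2 + pvWsum s xs ) := by
  induction xs with
  | nil => intro s init; simp [PySem.List.enumerate_nil, pvSumEv, pvSumOd, pvWsum]
  | cons x xs ih =>
    intro s init
    rw [PySem.List.enumerate_cons, List.foldl_cons, ih]
    have hflip : (s + 1) % 2 = 1 - s % 2 := by omega
    rcases Int.emod_two_eq s with h | h <;>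
      simp [pvStepB, h, hflip, pvSumEv, pvSumOd, pvWsum] <;>
      exact ⟨by ring, by ring, by ring⟩

-- ===== VERDICT (by name: the statement is the Claim_ definition above) =====
theorem calculate_personality_stats_spec : Claim_equal_calculate_personality_stats := by
  intro answers _
  unfold Spec_calculate_personality_stats
  unfold calculate_personality_stats calculate_personality_stats_alt
  rw [PySem.List.slice?_none_none_neg_one]
  rw [pv_fold_char answers 0 (0, 0, 0, 0)]
  simp [List.sum_reverse, (pv_sl_sums answers).1, (pv_sl_sums answers).2,
        pv_wsum_enum answers 0]
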